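-- pv_equiv track=rewrite | github.com/tkwang0530/LeetCode | 1051.py | heightChecker2
-- ===== SOURCE A (Python) =====
-- from  typing import List
--
-- def heightChecker2(heights: List[int]) -> int:
--     heightFreq = {}
--     for height in heights:
--         heightFreq[height] = heightFreq.get(height, 0) + 1
--
--     currHeight = count = 0
--     for i in range(len(heights)):
--         while heightFreq.get(currHeight, 0) == 0:
--             currHeight += 1
--         if currHeight != heights[i]:
--             count += 1
--         heightFreq[currHeight] -= 1
--     return count
-- ===== SOURCE B (Python) =====
-- def heightChecker2(heights):
--     expected = sorted(heights)
--     return sum(1 for h, e in zip(heights, expected) if h != e)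
-- ===== Notes on version B (the rewrite author's own statement) =====
-- stated objective: simpler
-- what changed: A reconstructs the sorted order with a counting-sort (frequency dict plus a scanning cursor); B calls a comparison sort once and counts mismatches in a single zip pass; Pre_ excludes lists containing a negative height, on which A's cursor scan never terminates (infinite loop).
import Mathlib
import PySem

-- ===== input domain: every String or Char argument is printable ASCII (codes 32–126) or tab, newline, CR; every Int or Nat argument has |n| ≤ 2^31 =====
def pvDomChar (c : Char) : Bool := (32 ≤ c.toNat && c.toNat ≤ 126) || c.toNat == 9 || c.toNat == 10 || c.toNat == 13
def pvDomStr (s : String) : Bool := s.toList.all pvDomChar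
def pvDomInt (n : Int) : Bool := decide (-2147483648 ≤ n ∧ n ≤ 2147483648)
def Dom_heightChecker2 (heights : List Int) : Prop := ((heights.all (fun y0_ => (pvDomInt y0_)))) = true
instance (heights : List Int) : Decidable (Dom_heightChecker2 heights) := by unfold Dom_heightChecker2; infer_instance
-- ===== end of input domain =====

-- B replaces A's counting-sort reconstruction (frequency dict + scanning cursor) by one
-- library comparison sort and a single zip pass counting mismatches (objective: simpler).


-- ===== PORT A =====
-- The inner 'while heightFreq.get(currHeight, 0) == 0: currHeight += 1' loop, with fuel as a
-- pure totality guard: under Pre_ (and Dom) the scan always finds a nonzero entry before the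
-- fuel runs out, so the fuel never changes the computed value on admitted inputs.
def findNextA (d : PySem.Dict Int Int) : Int → Nat → Int
  | curr, 0 => curr
  | curr, fuel+1 => if d.getD curr 0 = 0 then findNextA d (curr+1) fuel else curr

-- one iteration of A's 'for i in range(len(heights))' body; state = (heightFreq, currHeight, count).
-- 'heightFreq[currHeight] -= 1' is Dict.modify with default 0: exact here, since the while loop
-- only stops on a key that is present (getD default is 0).
def stepA (s : PySem.Dict Int Int × Int × Int) (h : Int) : PySem.Dict Int Int × Int × Int :=
  let c := findNextA s.1 s.2.1 ((2147483649 - s.2.1).toNat)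
  (s.1.modify c 0 (· - 1), c, if c ≠ h then s.2.2 + 1 else s.2.2)

def heightChecker2 (heights : List Int) : Int :=
  let freq := heights.foldl (fun d h => d.insert h (d.getD h 0 + 1)) PySem.Dict.empty
  ((PySem.List.pyRange 0 (heights.length : Int) 1).foldl
      (fun s i => stepA s (PySem.List.pyGetD heights i 0)) (freq, 0, 0)).2.2

-- ===== PORT B =====
def heightChecker2_alt (heights : List Int) : Int :=
  let expected := PySem.List.sorted heights (fun x => x) false
  (heights.zip expected).foldl (fun acc p => if p.1 ≠ p.2 then acc + 1 else acc) 0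

-- ===== PRECONDITION & SPEC =====
-- Pre_ excludes lists containing a negative height: there A never returns — its cursor starts
-- at 0 and only increments, so the while-scan for the negative entry loops forever.
def Pre_heightChecker2 (heights : List Int) : Prop := ∀ x ∈ heights, 0 ≤ x
instance (heights : List Int) : Decidable (Pre_heightChecker2 heights) := by unfold Pre_heightChecker2; infer_instance
def pvWitness_heightChecker2 : List Int := ([1, 2, 0])
def Spec_heightChecker2 (heights : List Int) (out : Int) : Prop := out = heightChecker2_alt heights
instance (heights : List Int) (out : Int) : Decidable (Spec_heightChecker2 heights out) := by unfold Spec_heightChecker2; infer_instance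

-- ===== CLAIM (what is proved, stated in full; the proofs are below) =====
def Claim_equal_heightChecker2 : Prop := ∀ (heights : List Int), Dom_heightChecker2 heights → Pre_heightChecker2 heights → Spec_heightChecker2 heights (heightChecker2 heights)

-- ===== LEMMAS AND PROOFS =====

-- the while-scan finds m, the least value with a nonzero frequency at or above curr
lemma findNextA_eq (d : PySem.Dict Int Int) (m : Int) :
    ∀ (fuel : Nat) (curr : Int), curr ≤ m → (m - curr).toNat < fuel →
      (∀ v, curr ≤ v → v < m → d.getD v 0 = 0) → d.getD m 0 ≠ 0 →
      findNextA d curr fuel = m := by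
  intro fuel
  induction fuel with
  | zero => intro curr h1 h2 h3 h4; omega
  | succ f ih =>
      intro curr h1 h2 h3 h4
      simp only [findNextA]
      by_cases hc : d.getD curr 0 = 0
      · rw [if_pos hc]
        have hne : curr ≠ m := fun he => h4 (he ▸ hc)
        exact ih (curr + 1) (by omega) (by omega)
          (fun v hv1 hv2 => h3 v (by omega) hv2) h4
      · rw [if_neg hc]
        rcases lt_or_eq_of_le h1 with hlt | he
        · exact absurd (h3 curr le_rfl hlt) hc
        · exact he

-- the main loop: if d holds exactly the multiset rem (sorted, bounded, all ≥ curr) and rem is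
-- as long as the remaining input todo, the loop extracts rem in order and counts zip-mismatches
lemma loopA_eq : ∀ (todo rem : List Int) (d : PySem.Dict Int Int) (curr cnt : Int),
    rem.length = todo.length →
    rem.Pairwise (· ≤ ·) →
    (∀ v, d.getD v 0 = (rem.count v : Int)) →
    (∀ x ∈ rem, curr ≤ x) →
    (∀ x ∈ rem, x ≤ 2147483648) →
    (todo.foldl stepA (d, curr, cnt)).2.2
      = (todo.zip rem).foldl (fun acc p => if p.1 ≠ p.2 then acc + 1 else acc) cnt := by
  intro todo
  induction todo with
  | nil => intro rem d curr cnt _ _ _ _ _; simp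
  | cons t ts ih =>
      intro rem d curr cnt hlen hsort hd hcur hbd
      match rem, hlen with
      | m :: rem', hlen =>
        have hm : curr ≤ m := hcur m (List.mem_cons_self ..)
        have hmb : m ≤ 2147483648 := hbd m (List.mem_cons_self ..)
        have hhead : ∀ x ∈ rem', m ≤ x := fun x hx => (List.pairwise_cons.mp hsort).1 x hx
        have hfind : findNextA d curr ((2147483649 - curr).toNat) = m := by
          apply findNextA_eq d m _ curr hm (by omega)
          · intro v hv1 hv2
            have : v ∉ m :: rem' := by
              intro hmem
              rcases List.mem_cons.mp hmem with h | h
              · omega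
              · exact absurd (hhead v h) (by omega)
            rw [hd v, List.count_eq_zero.mpr this]; rfl
          · have : (m :: rem').count m ≠ 0 := by
              simp [List.count_cons_self]
            rw [hd m]; exact_mod_cast this
        show (ts.foldl stepA (stepA (d, curr, cnt) t)).2.2 = _
        have hstep : stepA (d, curr, cnt) t
            = (d.modify m 0 (· - 1), m, if m ≠ t then cnt + 1 else cnt) := by
          simp only [stepA, hfind]
        rw [hstep]
        have hd' : ∀ v, (d.modify m 0 (· - 1)).getD v 0 = (rem'.count v : Int) := by
          intro v
          rw [PySem.Dict.getD_modify]
          by_cases hv : v = m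
          · subst hv
            rw [if_pos rfl, hd v, List.count_cons_self]
            push_cast; ring
          · rw [if_neg hv, hd v, List.count_cons_of_ne (by simpa [eq_comm] using hv)]
        rw [ih rem' (d.modify m 0 (· - 1)) m (if m ≠ t then cnt + 1 else cnt)
          (by simpa using hlen) (List.pairwise_cons.mp hsort).2 hd' hhead
          (fun x hx => hbd x (List.mem_cons_of_mem _ hx))]
        have : (if m ≠ t then cnt + 1 else cnt) = (if t ≠ m then cnt + 1 else cnt) := by
          by_cases h : t = m <;> simp [h, Ne, eq_comm]
        rw [List.zip_cons_cons, List.foldl_cons, this]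

-- any member is ≤ 2^31 on Dom
lemma dom_bound (heights : List Int) (hdom : Dom_heightChecker2 heights) :
    ∀ x ∈ heights, x ≤ 2147483648 := by
  intro x hx
  have := List.all_eq_true.mp hdom x hx
  simp [pvDomInt] at this
  omega

-- ===== VERDICT (by name: the statement is the Claim_ definition above) =====
theorem heightChecker2_spec : Claim_equal_heightChecker2 := by
  intro heights hdom hpre
  show (List.foldl (fun s i => stepA s (PySem.List.pyGetD heights i 0))
      (PySem.Dict.counter heights, 0, 0) (PySem.List.pyRange 0 (heights.length : Int) 1)).2.2
    = List.foldl (fun acc p => if p.1 ≠ p.2 then acc + 1 else acc) 0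
        (heights.zip (PySem.List.sorted heights (fun x => x) false))
  rw [PySem.List.foldl_pyRange_zero_pyGetD' heights 0 stepA]
  set rem := PySem.List.sorted heights (fun x => x) false with hrem
  have hperm : rem.Perm heights := PySem.List.sorted_perm heights (fun x => x) false
  rw [loopA_eq heights rem (PySem.Dict.counter heights) 0 0
      (hperm.length_eq)
      (by simpa using PySem.List.sorted_pairwise heights (fun x => x))
      (by intro v; rw [PySem.Dict.getD_counter, hperm.count_eq])
      (fun x hx => hpre x (hperm.mem_iff.mp hx))
      (fun x hx => dom_bound heights hdom x (hperm.mem_iff.mp hx))]
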